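-- pv_equiv track=rewrite | github.com/AdaMartin18010/PostgreSQL_modern | tests/scripts/run_single_test.py | parse_sql_blocks
-- ===== SOURCE A (Python) =====
-- def parse_sql_blocks(sql_content: str) -> dict:
--     """解析SQL测试块"""
--     blocks = {}
--     current_block = None
--     current_content = []
--
--     for line in sql_content.split('\n'):
--         stripped = line.strip()
--
--         if stripped.startswith('-- SETUP'):
--             if current_block and current_content:
--                 blocks[current_block] = '\n'.join(current_content)
--             current_block = 'setup'
--             current_content = []
--         elif stripped.startswith('-- TEST_BODY'):
--             if current_block and current_content:
--                 blocks[current_block] = '\n'.join(current_content)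
--             current_block = 'test_body'
--             current_content = []
--         elif stripped.startswith('-- TEARDOWN'):
--             if current_block and current_content:
--                 blocks[current_block] = '\n'.join(current_content)
--             current_block = 'teardown'
--             current_content = []
--         elif current_block:
--             # 跳过注释行（除了块标记）
--             if not stripped.startswith('--') or stripped.startswith('-- EXPECT'):
--                 current_content.append(line)
--
--     # 添加最后一个块
--     if current_block and current_content:
--         blocks[current_block] = '\n'.join(current_content)
--
--     return blocks
-- ===== SOURCE B (Python) =====
-- def parse_sql_blocks(sql_content: str) -> dict:
--     """Parse SQL test blocks by index-based segmentation: find each marker,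
--     slice out the lines up to the next marker, filter comments, assign."""
--
--     def label_of(line):
--         s = line.strip()
--         if s.startswith('-- SETUP'):
--             return 'setup'
--         elif s.startswith('-- TEST_BODY'):
--             return 'test_body'
--         elif s.startswith('-- TEARDOWN'):
--             return 'teardown'
--         return None
--
--     def keep(line):
--         s = line.strip()
--         return not s.startswith('--') or s.startswith('-- EXPECT')
--
--     lines = sql_content.split('\n')
--     n = len(lines)
--     blocks = {}
--     i = 0
--     while i < n and label_of(lines[i]) is None:
--         i += 1
--     while i < n:
--         label = label_of(lines[i])
--         j = i + 1
--         while j < n and label_of(lines[j]) is None: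
--             j += 1
--         content = [l for l in lines[i + 1:j] if keep(l)]
--         if content:
--             blocks[label] = '\n'.join(content)
--         i = j
--     return blocks
-- ===== Notes on version B (the rewrite author's own statement) =====
-- stated objective: alternative
-- what changed: Replaces A's flush-on-marker state machine (current block label + accumulated content flushed at each marker and at the end) with index-based segmentation: skip to the first marker, then for each marker slice out the lines up to the next marker, filter comment lines, and assign the joined block if non-empty.
import Mathlib
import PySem

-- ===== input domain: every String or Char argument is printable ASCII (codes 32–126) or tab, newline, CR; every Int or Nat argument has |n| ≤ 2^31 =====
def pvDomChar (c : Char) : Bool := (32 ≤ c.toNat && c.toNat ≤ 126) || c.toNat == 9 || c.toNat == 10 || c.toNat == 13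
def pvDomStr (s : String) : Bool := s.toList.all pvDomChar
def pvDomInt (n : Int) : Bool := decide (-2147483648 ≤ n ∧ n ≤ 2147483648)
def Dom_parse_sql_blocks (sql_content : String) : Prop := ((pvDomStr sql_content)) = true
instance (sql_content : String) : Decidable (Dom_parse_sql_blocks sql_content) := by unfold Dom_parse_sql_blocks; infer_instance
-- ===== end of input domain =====

-- B replaces A's flush-on-marker state machine with marker-to-marker segmentation
-- (slice out each block's lines, filter, assign) — objective: alternative decomposition.

-- ===== PORT A =====
-- s.split('\n') with the nonempty separator; exact (PySem.Chars.splitOn is Python's str.split for sep ≠ "")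
def pvSplitNl (s : String) : List String :=
  (PySem.Chars.splitOn s.toList ['\n']).map String.ofList

-- A's 'if current_block and current_content: blocks[current_block] = "\n".join(current_content)'
def pvFlushA (blocks : PySem.Dict String String) (current_block : Option String)
    (current_content : List String) : PySem.Dict String String :=
  match current_block with
  | none => blocks
  | some cb => if current_content.isEmpty then blocks
               else blocks.insert cb (PySem.Str.join "\n" current_content)

-- one iteration of A's for-loop over the lines
def pvStepA (st : PySem.Dict String String × Option String × List String) (line : String) :
    PySem.Dict String String × Option String × List String :=
  let (blocks, current_block, current_content) := st
  let stripped := PySem.Str.strip line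
  if PySem.Str.startswith stripped "-- SETUP" then
    (pvFlushA blocks current_block current_content, some "setup", [])
  else if PySem.Str.startswith stripped "-- TEST_BODY" then
    (pvFlushA blocks current_block current_content, some "test_body", [])
  else if PySem.Str.startswith stripped "-- TEARDOWN" then
    (pvFlushA blocks current_block current_content, some "teardown", [])
  else match current_block with
    | some _ =>
        if !(PySem.Str.startswith stripped "--") || PySem.Str.startswith stripped "-- EXPECT" then
          (blocks, current_block, current_content ++ [line])
        else (blocks, current_block, current_content)
    | none => (blocks, current_block, current_content)

def parse_sql_blocks (sql_content : String) : List (String × String) :=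
  let st := (pvSplitNl sql_content).foldl pvStepA (PySem.Dict.empty, none, [])
  (pvFlushA st.1 st.2.1 st.2.2).items

-- ===== PORT B =====
def pvLabelOf (line : String) : Option String :=
  let s := PySem.Str.strip line
  if PySem.Str.startswith s "-- SETUP" then some "setup"
  else if PySem.Str.startswith s "-- TEST_BODY" then some "test_body"
  else if PySem.Str.startswith s "-- TEARDOWN" then some "teardown"
  else none

def pvKeep (line : String) : Bool :=
  let s := PySem.Str.strip line
  !(PySem.Str.startswith s "--") || PySem.Str.startswith s "-- EXPECT"

-- Source B's outer while-loop: the marker at lines[i] has label `label`, `rest` = lines[i+1:];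
-- the inner while advancing j is the takeWhile/dropWhile split at the next marker.
def pvGoB (label : String) (rest : List String) (blocks : PySem.Dict String String) :
    PySem.Dict String String :=
  let content := (rest.takeWhile (fun l => (pvLabelOf l).isNone)).filter pvKeep
  let blocks' := if content.isEmpty then blocks
                 else blocks.insert label (PySem.Str.join "\n" content)
  match h : rest.dropWhile (fun l => (pvLabelOf l).isNone) with
  | [] => blocks'
  | m :: rest' =>
      match pvLabelOf m with
      | some l' => pvGoB l' rest' blocks'
      | none => blocks'   -- unreachable: the head of a dropWhile result fails the predicate
termination_by rest.length
decreasing_by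
  have := List.length_dropWhile_le (fun l => (pvLabelOf l).isNone) rest
  rw [h] at this; simp at this; omega

def parse_sql_blocks_alt (sql_content : String) : List (String × String) :=
  let lines := pvSplitNl sql_content
  -- Source B's first while-loop skips to the first marker line
  (match lines.dropWhile (fun l => (pvLabelOf l).isNone) with
   | [] => (PySem.Dict.empty : PySem.Dict String String)
   | m :: rest =>
       match pvLabelOf m with
       | some l => pvGoB l rest PySem.Dict.empty
       | none => PySem.Dict.empty).items

-- ===== PRECONDITION & SPEC =====
def Spec_parse_sql_blocks (sql_content : String) (out : List (String × String)) : Prop := out = parse_sql_blocks_alt sql_content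
instance (sql_content : String) (out : List (String × String)) : Decidable (Spec_parse_sql_blocks sql_content out) := by unfold Spec_parse_sql_blocks; infer_instance

-- ===== CLAIM (what is proved, stated in full; the proofs are below) =====
def Claim_equal_parse_sql_blocks : Prop := ∀ (sql_content : String), Dom_parse_sql_blocks sql_content → Spec_parse_sql_blocks sql_content (parse_sql_blocks sql_content)

-- ===== LEMMAS AND PROOFS =====

-- A's step, phrased through B's two predicates (the branch conditions are literally the same tests)
theorem pvStepA_eval (b : PySem.Dict String String) (cb : Option String) (cc : List String)
    (x : String) :
    pvStepA (b, cb, cc) x =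
      match pvLabelOf x with
      | some l => (pvFlushA b cb cc, some l, [])
      | none =>
          match cb with
          | some _ => if pvKeep x then (b, cb, cc ++ [x]) else (b, cb, cc)
          | none => (b, cb, cc) := by
  simp only [pvStepA, pvLabelOf, pvKeep]
  split_ifs <;> rfl

-- proof-only helper: pvGoB generalized by content already accumulated for the current block
def pvSeg (label : String) (rest : List String) (cc : List String)
    (blocks : PySem.Dict String String) : PySem.Dict String String :=
  let content := cc ++ (rest.takeWhile (fun l => (pvLabelOf l).isNone)).filter pvKeep
  let blocks' := if content.isEmpty then blocks
                 else blocks.insert label (PySem.Str.join "\n" content)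
  match rest.dropWhile (fun l => (pvLabelOf l).isNone) with
  | [] => blocks'
  | m :: rest' =>
      match pvLabelOf m with
      | some l' => pvGoB l' rest' blocks'
      | none => blocks'

theorem pvGoB_eq_seg (label : String) (rest : List String)
    (blocks : PySem.Dict String String) :
    pvGoB label rest blocks = pvSeg label rest [] blocks := by
  rw [pvGoB, pvSeg]
  simp only [List.nil_append]
  cases hd : List.dropWhile (fun l => (pvLabelOf l).isNone) rest <;> simp only

-- A's loop from inside a block (current_block = some lab, accumulated content cc)
-- computes B's segmentation of the remaining lines with cc prepended to the first segment.
theorem pvInsideSeg (rest : List String) (blocks : PySem.Dict String String)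
    (lab : String) (cc : List String) :
    pvFlushA (rest.foldl pvStepA (blocks, some lab, cc)).1
        (rest.foldl pvStepA (blocks, some lab, cc)).2.1
        (rest.foldl pvStepA (blocks, some lab, cc)).2.2 =
      pvSeg lab rest cc blocks := by
  induction rest generalizing blocks lab cc with
  | nil => simp [pvSeg, pvFlushA]
  | cons x xs ih =>
      rw [List.foldl_cons, pvStepA_eval]
      rcases h : pvLabelOf x with _ | l'
      · -- content line (kept or skipped comment)
        have hc : cc ++ List.filter pvKeep (x :: List.takeWhile (fun l => (pvLabelOf l).isNone) xs)
            = (if pvKeep x then cc ++ [x] else cc)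
              ++ List.filter pvKeep (List.takeWhile (fun l => (pvLabelOf l).isNone) xs) := by
          rcases hk : pvKeep x with _ | _ <;> simp [hk]
        have hs : pvSeg lab (x :: xs) cc blocks
            = pvSeg lab xs (if pvKeep x then cc ++ [x] else cc) blocks := by
          rw [pvSeg, pvSeg]
          simp only [List.takeWhile_cons, List.dropWhile_cons, h, Option.isNone_none, ite_true]
          rw [hc]
        rw [hs]
        rcases hk : pvKeep x with _ | _ <;>
          simp only [h, hk, Bool.false_eq_true, if_false, if_true] <;>
            exact ih ..
      · -- marker line: A flushes and restarts; B closes the segment and recurses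
        simp only [h, ih]
        conv_rhs => rw [pvSeg]
        simp only [List.takeWhile_cons, List.dropWhile_cons, h, Option.isNone_some,
          Bool.false_eq_true, if_false, List.filter_nil, List.append_nil]
        rw [pvGoB_eq_seg]
        rcases cc with _ | ⟨c, cs⟩ <;> simp [pvFlushA]

-- A's loop before the first marker (current_block = None) skips to the first marker.
theorem pvBeforeSeg (lines : List String) (blocks : PySem.Dict String String) :
    pvFlushA (lines.foldl pvStepA (blocks, none, [])).1
        (lines.foldl pvStepA (blocks, none, [])).2.1
        (lines.foldl pvStepA (blocks, none, [])).2.2 =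
      (match lines.dropWhile (fun l => (pvLabelOf l).isNone) with
       | [] => blocks
       | m :: rest =>
           match pvLabelOf m with
           | some l => pvGoB l rest blocks
           | none => blocks) := by
  induction lines with
  | nil => simp [pvFlushA]
  | cons x xs ih =>
      rw [List.foldl_cons, pvStepA_eval]
      rcases h : pvLabelOf x with _ | l
      · simp only [h, List.dropWhile_cons, Option.isNone_none, if_true, ih]
      · simp only [h, List.dropWhile_cons, Option.isNone_some, Bool.false_eq_true, if_false]
        rw [pvInsideSeg, pvGoB_eq_seg]
        rfl

-- ===== VERDICT (by name: the statement is the Claim_ definition above) =====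
theorem parse_sql_blocks_spec : Claim_equal_parse_sql_blocks := by
  intro s _
  unfold Spec_parse_sql_blocks
  simp only [parse_sql_blocks, parse_sql_blocks_alt, pvBeforeSeg]
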